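-- pv_equiv track=rewrite | github.com/CropEvol/lecture | textbook_2022/scripts/assemble.py | edge_positon
-- ===== SOURCE A (Python) =====
-- def edge_positon(path):
--     i = 0
--     pos = {}
--     for p in path:
--         if not p in pos.keys():
--                 pos[p] = (i,i)
--                 i += 1
--     return pos
-- ===== SOURCE B (Python) =====
-- def edge_positon(path):
--     # backwards scan: last write wins, so first[p] = first-occurrence index of p
--     first = {}
--     for i in range(len(path) - 1, -1, -1):
--         first[path[i]] = i
--     # sort the distinct elements by their first-occurrence index, then number them
--     order = sorted(first, key=first.get)
--     return {p: (i, i) for i, p in enumerate(order)}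
-- ===== Notes on version B (the rewrite author's own statement) =====
-- stated objective: alternative
-- what changed: B replaces A's forward counter-plus-membership loop by a backwards index scan that records each element's first-occurrence index (last write wins), a sort of the distinct elements by that index, and a final numbering pass.
import Mathlib
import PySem

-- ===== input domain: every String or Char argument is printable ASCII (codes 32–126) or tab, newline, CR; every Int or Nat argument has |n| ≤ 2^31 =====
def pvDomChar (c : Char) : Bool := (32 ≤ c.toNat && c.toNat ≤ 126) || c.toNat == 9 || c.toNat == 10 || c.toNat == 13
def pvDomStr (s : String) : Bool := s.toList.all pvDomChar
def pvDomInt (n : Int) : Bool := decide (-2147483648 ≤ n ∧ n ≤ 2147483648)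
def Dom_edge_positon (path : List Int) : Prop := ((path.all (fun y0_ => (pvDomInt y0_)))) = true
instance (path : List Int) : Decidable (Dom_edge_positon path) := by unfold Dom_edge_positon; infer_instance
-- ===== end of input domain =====

-- B replaces A's forward counter-plus-membership loop by a different algorithm: a backwards index
-- scan building a first-occurrence-index map, a sort of the distinct elements by that index, then
-- a positional numbering pass (alternative decomposition, O(n log n) vs A's O(n) dict loop).

-- ===== PORT A =====
-- counter i and dict pos carried together through the loop; returns the dict (assoc list in insertion order)
def edge_positon (path : List Int) : List (Int × Int × Int) :=
  (path.foldl
    (fun (s : Int × PySem.Dict Int (Int × Int)) p =>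
      if s.2.contains p = false then (s.1 + 1, s.2.insert p (s.1, s.1)) else s)
    (0, PySem.Dict.empty)).2.items

-- ===== PORT B =====
-- for i in range(len(path)-1, -1, -1): first[path[i]] = i   (pyGetD is exact: every i is in range)
-- order = sorted(first, key=first.get)   (first.get p = getD p 0: every p passed is a key of first)
-- {p: (i, i) for i, p in enumerate(order)}   (order has distinct keys, so the dict is the plain map)
def edge_positon_alt (path : List Int) : List (Int × Int × Int) :=
  let first := (PySem.List.pyRange ((path.length : Int) - 1) (-1) (-1)).foldl
      (fun (d : PySem.Dict Int Int) i => d.insert (PySem.List.pyGetD path i 0) i) PySem.Dict.empty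
  let order := PySem.List.sorted first.keys (fun p => first.getD p 0)
  (PySem.List.enumerate order 0).map (fun ip => (ip.2, ip.1, ip.1))

-- ===== PRECONDITION & SPEC =====
def Spec_edge_positon (path : List Int) (out : List (Int × Int × Int)) : Prop := out = edge_positon_alt path
instance (path : List Int) (out : List (Int × Int × Int)) : Decidable (Spec_edge_positon path out) := by unfold Spec_edge_positon; infer_instance

-- ===== CLAIM (what is proved, stated in full; the proofs are below) =====
def Claim_equal_edge_positon : Prop := ∀ (path : List Int), Dom_edge_positon path → Spec_edge_positon path (edge_positon path)

-- ===== LEMMAS AND PROOFS =====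

-- invariant of A's loop: the final dict is the start dict plus the fresh first occurrences, numbered from i
theorem pv_loop_items (path : List Int) :
    ∀ (d : PySem.Dict Int (Int × Int)) (i : Int), d.keys.Nodup →
    (path.foldl
      (fun (s : Int × PySem.Dict Int (Int × Int)) p =>
        if s.2.contains p = false then (s.1 + 1, s.2.insert p (s.1, s.1)) else s)
      (i, d)).2.items
    = d.items ++ (PySem.List.enumerate
        ((PySem.Set.ofList path).filter (fun y => !(d.contains y))) i).map
        (fun ip => (ip.2, ip.1, ip.1)) := by
  induction path with
  | nil => intro d i _; simp [PySem.Set.ofList]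
  | cons p rest ih =>
    intro d i hnd
    rw [PySem.Set.ofList_cons]
    by_cases hc : d.contains p = false
    · simp only [List.foldl_cons, hc, if_true]
      rw [ih (d.insert p (i, i)) (i + 1) (PySem.Dict.nodup_keys_insert d p (i, i) hnd)]
      rw [PySem.Dict.items_insert_of_not_contains d (i, i) hc]
      have hfp : (!(d.contains p)) = true := by simp [hc]
      simp only [List.filter_cons, hfp, if_true]
      rw [PySem.List.enumerate_cons]
      have hfun : (fun y => !(PySem.Dict.contains (d.insert p (i, i)) y))
          = (fun y => !(y == p) && !(d.contains y)) := by
        funext y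
        rw [PySem.Dict.contains_insert]
        cases h : (y == p) <;> simp_all
      have hdf : ((PySem.Set.discard (PySem.Set.ofList rest) p).filter (fun y => !(d.contains y)))
          = ((PySem.Set.ofList rest).filter (fun y => !(PySem.Dict.contains (d.insert p (i, i)) y))) := by
        rw [hfun]
        simp [PySem.Set.discard, List.filter_filter, Bool.and_comm]
      rw [hdf]
      simp
    · have hc' : d.contains p = true := by
        cases h : d.contains p
        · exact absurd h hc
        · rfl
      simp only [List.foldl_cons, hc', Bool.true_eq_false, if_false]
      rw [ih d i hnd]
      have hfp : (!(d.contains p)) = false := by simp [hc']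
      simp only [List.filter_cons, hfp]
      have hdf : ((PySem.Set.discard (PySem.Set.ofList rest) p).filter (fun y => !(d.contains y)))
          = ((PySem.Set.ofList rest).filter (fun y => !(d.contains y))) := by
        simp only [PySem.Set.discard, List.filter_filter]
        apply List.filter_congr
        intro y _
        cases h : (y == p)
        · simp
        · have : y = p := by simpa using h
          subst this
          simp [hc']
      rw [hdf]
      simp

-- B's backwards loop, rewritten as a foldr over the ascending range
theorem pv_first_eq_foldr (path : List Int) :
    (PySem.List.pyRange ((path.length : Int) - 1) (-1) (-1)).foldl
      (fun (d : PySem.Dict Int Int) i => d.insert (PySem.List.pyGetD path i 0) i) PySem.Dict.empty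
    = (PySem.List.pyRange 0 (path.length : Int) 1).foldr
        (fun i d => d.insert (PySem.List.pyGetD path i 0) i) PySem.Dict.empty := by
  rw [PySem.List.pyRange_neg_one_eq_reverse]
  have h1 : ((-1 : Int) + 1) = 0 := by ring
  have h2 : ((path.length : Int) - 1 + 1) = (path.length : Int) := by ring
  rw [h1, h2, List.foldl_reverse]

-- value characterisation of the backwards loop: get? k = first index of k in path.drop a, shifted by a
theorem pv_foldr_get? (path : List Int) :
    ∀ (a : Nat), a ≤ path.length → ∀ (k : Int),
    ((PySem.List.pyRange (a : Int) (path.length : Int) 1).foldr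
        (fun i d => d.insert (PySem.List.pyGetD path i 0) i) PySem.Dict.empty).get? k
    = (PySem.List.index? (path.drop a) k).map (fun j => ((a + j : Nat) : Int)) := by
  intro a
  induction h : path.length - a generalizing a with
  | zero =>
    intro ha k
    have haeq : a = path.length := by omega
    subst haeq
    rw [PySem.List.pyRange_one_eq_nil (by omega)]
    simp [PySem.Dict.get?_empty, PySem.List.index?]
  | succ m ih =>
    intro ha k
    have halt : a < path.length := by omega
    rw [PySem.List.pyRange_one_cons (by exact_mod_cast halt)]
    have hdrop : path.drop a = path[a] :: path.drop (a + 1) := by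
      exact (List.getElem_cons_drop halt).symm
    simp only [List.foldr_cons]
    have hget : PySem.List.pyGetD path (a : Int) 0 = path[a] := by
      rw [PySem.List.pyGetD_natCast]
      simp [halt]
    rw [hget]
    have hstep : ((a : Int) + 1) = ((a + 1 : Nat) : Int) := by push_cast; ring
    by_cases hk : k = path[a]
    · subst hk
      rw [PySem.Dict.get?_insert_self]
      rw [hdrop, PySem.List.index?_cons_self]
      simp
    · rw [PySem.Dict.get?_insert_of_ne _ _ hk]
      rw [hstep, ih (a + 1) (by omega) (by omega) k]
      rw [hdrop, PySem.List.index?_cons_of_ne (x := path[a]) (v := k) _ (fun h => hk h.symm)]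
      cases PySem.List.index? (path.drop (a + 1)) k with
      | none => simp
      | some j =>
        simp only [Option.map_some]
        congr 1
        push_cast
        ring

-- idxOf? agrees with idxOf on members
theorem pv_idxOf? (l : List Int) (p : Int) (hp : p ∈ l) : List.idxOf? p l = some (List.idxOf p l) := by
  induction l with
  | nil => cases hp
  | cons x t ih =>
    by_cases h : x = p
    · subst h; simp [List.idxOf?_cons, List.idxOf_cons_self]
    · have hpt : p ∈ t := by cases hp with | head => exact absurd rfl h | tail _ h2 => exact h2
      simp [List.idxOf?_cons, List.idxOf_cons_ne _ h, beq_iff_eq, h, ih hpt, Nat.succ_eq_add_one]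

-- hence: on elements of path, first.getD p 0 is the first-occurrence index of p
theorem pv_first_getD (path : List Int) (p : Int) (hp : p ∈ path) :
    ((PySem.List.pyRange ((path.length : Int) - 1) (-1) (-1)).foldl
      (fun (d : PySem.Dict Int Int) i => d.insert (PySem.List.pyGetD path i 0) i)
      PySem.Dict.empty).getD p 0 = (List.idxOf p path : Int) := by
  rw [pv_first_eq_foldr]
  have h := pv_foldr_get? path 0 (by omega) p
  norm_num at h
  rw [PySem.Dict.getD_eq_get?_getD, h]
  rw [pv_idxOf? path p hp]
  simp

-- keys of the backwards loop are the distinct elements of path.reverse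
theorem pv_first_keys (path : List Int) :
    ((PySem.List.pyRange ((path.length : Int) - 1) (-1) (-1)).foldl
      (fun (d : PySem.Dict Int Int) i => d.insert (PySem.List.pyGetD path i 0) i)
      PySem.Dict.empty).keys = PySem.Set.ofList path.reverse := by
  rw [PySem.Dict.keys_foldl_insert_key
    (f := fun (d : PySem.Dict Int Int) (i : Int) => i)
    (key := fun i => PySem.List.pyGetD path i 0)]
  rw [PySem.Dict.keys_empty]
  have hmap : (PySem.List.pyRange ((path.length : Int) - 1) (-1) (-1)).map
      (fun i => PySem.List.pyGetD path i 0) = path.reverse := by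
    rw [PySem.List.pyRange_neg_one_eq_reverse]
    have h1 : ((-1 : Int) + 1) = 0 := by ring
    have h2 : ((path.length : Int) - 1 + 1) = (path.length : Int) := by ring
    rw [h1, h2, List.map_reverse]
    have := PySem.List.map_pyGetD_pyRange_zero path 0
    simp only [PySem.List.len_eq] at this
    rw [this]
  rw [hmap]
  rfl

-- the distinct elements in first-occurrence order have strictly increasing first indices
theorem pv_ofList_pairwise_idxOf (path : List Int) :
    (PySem.Set.ofList path).Pairwise (fun a b => List.idxOf a path < List.idxOf b path) := by
  induction path with
  | nil => simp [PySem.Set.ofList]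
  | cons p rest ih =>
    rw [PySem.Set.ofList_cons]
    constructor
    · intro b hb
      have hbne : b ≠ p := by
        simp [PySem.Set.discard] at hb
        exact hb.2
      rw [List.idxOf_cons_self, List.idxOf_cons_ne _ (fun h => hbne h.symm)]
      omega
    · have hsub : ((PySem.Set.ofList rest).discard p).Sublist (PySem.Set.ofList rest) := by
        simp only [PySem.Set.discard]
        exact List.filter_sublist
      have h1 : ((PySem.Set.ofList rest).discard p).Pairwise
          (fun a b => List.idxOf a rest < List.idxOf b rest) := ih.sublist hsub
      apply h1.imp_of_mem
      intro a b ha hb hab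
      have hane : a ≠ p := by simp [PySem.Set.discard] at ha; exact ha.2
      have hbne : b ≠ p := by simp [PySem.Set.discard] at hb; exact hb.2
      rw [List.idxOf_cons_ne _ (fun h => hane h.symm), List.idxOf_cons_ne _ (fun h => hbne h.symm)]
      omega

-- B's sort recovers the first-occurrence order of the distinct elements
theorem pv_order_eq (path : List Int) :
    PySem.List.sorted
      (((PySem.List.pyRange ((path.length : Int) - 1) (-1) (-1)).foldl
        (fun (d : PySem.Dict Int Int) i => d.insert (PySem.List.pyGetD path i 0) i)
        PySem.Dict.empty).keys)
      (fun p => ((PySem.List.pyRange ((path.length : Int) - 1) (-1) (-1)).foldl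
        (fun (d : PySem.Dict Int Int) i => d.insert (PySem.List.pyGetD path i 0) i)
        PySem.Dict.empty).getD p 0)
    = PySem.Set.ofList path := by
  apply PySem.List.sorted_eq_of_perm_of_pairwise_lt
  · rw [pv_first_keys]
    apply (List.perm_ext_iff_of_nodup (PySem.Set.nodup_ofList path)
      (PySem.Set.nodup_ofList path.reverse)).mpr
    intro a
    rw [PySem.Set.mem_ofList, PySem.Set.mem_ofList, List.mem_reverse]
  · apply (pv_ofList_pairwise_idxOf path).imp_of_mem
    intro a b ha hb hab
    have hamem : a ∈ path := (PySem.Set.mem_ofList path a).mp ha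
    have hbmem : b ∈ path := (PySem.Set.mem_ofList path b).mp hb
    rw [pv_first_getD path a hamem, pv_first_getD path b hbmem]
    exact_mod_cast hab

-- ===== VERDICT (by name: the statement is the Claim_ definition above) =====
theorem edge_positon_spec : Claim_equal_edge_positon := by
  intro path _
  unfold Spec_edge_positon edge_positon edge_positon_alt
  rw [pv_loop_items path PySem.Dict.empty 0 (by simp [PySem.Dict.empty, PySem.Dict.keys])]
  simp only [pv_order_eq path]
  simp [PySem.Dict.empty]
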